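-- pv_equiv track=rewrite | github.com/wtavi00/My-playground | Test_Dectionary.py | sms_encoding
-- ===== SOURCE A (Python) =====
-- def sms_encoding(data):
--     # Helper function to determine if a character is a vowel
--     def is_vowel(char):
--         return char.lower() in 'aeiou'
--
--     # Split the sentence into words
--     words = data.split()
--
--     # Encode each word based on the rules
--     encoded_words = []
--     for word in words:
--         # Check if the word has any consonants
--         if any(not is_vowel(char) for char in word if char.isalpha()):
--             # Retain only consonants
--             encoded_word = ''.join(char for char in word if not is_vowel(char))
--         else:
--             # Retain the word as is if it has only vowels
--             encoded_word = word
--         encoded_words.append(encoded_word)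
--
--     # Join the encoded words with spaces
--     return ' '.join(encoded_words)
-- ===== SOURCE B (Python) =====
-- def sms_encoding(data):
--     # Single streaming pass over the characters (no split, no per-word scans):
--     # a small state machine accumulates the current word, its de-voweled form
--     # and a consonant flag, flushing an encoded word at each whitespace run.
--     out = []          # encoded words, in order
--     word = []         # raw chars of the current word
--     kept = []         # current word with vowels removed
--     saw = False       # kept contains an alphabetic char (a consonant)
--     for c in data:
--         if c.isspace():
--             if word:
--                 out.append(''.join(kept if saw else word))
--                 word, kept, saw = [], [], False
--         else:
--             word.append(c)
--             if c.lower() not in 'aeiou':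
--                 kept.append(c)
--                 if c.isalpha():
--                     saw = True
--     if word:
--         out.append(''.join(kept if saw else word))
--     return ' '.join(out)
-- ===== Notes on version B (the rewrite author's own statement) =====
-- stated objective: alternative
-- what changed: A splits the input into a word list and scans each word twice (an any()-consonant scan, then a filter-join), finally joining the encoded words; B never splits: it makes one streaming character-level pass with a state machine that accumulates the current word, its de-voweled form and a consonant flag together, flushing an encoded word at each whitespace boundary.
import Mathlib
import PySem

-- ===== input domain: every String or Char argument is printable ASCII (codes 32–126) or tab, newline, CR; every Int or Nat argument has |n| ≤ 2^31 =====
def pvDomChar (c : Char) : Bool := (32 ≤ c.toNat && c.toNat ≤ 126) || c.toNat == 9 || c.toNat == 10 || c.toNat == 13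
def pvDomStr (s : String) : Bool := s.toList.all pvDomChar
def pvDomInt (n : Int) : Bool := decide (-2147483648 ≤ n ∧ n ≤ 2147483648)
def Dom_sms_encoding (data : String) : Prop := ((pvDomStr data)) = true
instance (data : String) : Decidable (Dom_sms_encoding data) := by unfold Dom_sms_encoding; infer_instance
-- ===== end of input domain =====

-- B replaces A's split-into-words + two scans per word + join by a single streaming
-- character-level state machine that flushes an encoded word at each whitespace boundary.


-- ===== PORT A =====
-- is_vowel / the vowel test — char.lower() in 'aeiou'  (single-char substring test)
def pvIsVowel (c : Char) : Bool :=
  PySem.Chars.isIn [PySem.Chars.lowerChar c] "aeiou".toList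

-- per-word body of A's loop: scan for a consonant, then strip vowels (or keep word)
def pvEncodeWordA (w : List Char) : List Char :=
  if w.any (fun c => PySem.Chars.isalpha c && !pvIsVowel c) then
    w.filter (fun c => !pvIsVowel c)
  else w

def sms_encoding (data : String) : String :=
  PySem.Str.join " "
    ((PySem.Str.split₀ data).map (fun w => String.ofList (pvEncodeWordA w.toList)))

-- ===== PORT B =====
-- B's loop body: state = (encoded words so far, current word, its de-voweled form, consonant flag)
def pvStepB : (List (List Char) × List Char × List Char × Bool) → Char →
    (List (List Char) × List Char × List Char × Bool)
  | (out, word, kept, saw), c =>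
    if PySem.Chars.isspace c then
      if word ≠ [] then (out ++ [if saw then kept else word], [], [], false)
      else (out, word, kept, saw)
    else
      if pvIsVowel c then (out, word ++ [c], kept, saw)
      else (out, word ++ [c], kept ++ [c], saw || PySem.Chars.isalpha c)

-- the trailing 'if word:' flush after the loop
def pvFinishB : (List (List Char) × List Char × List Char × Bool) → List (List Char)
  | (out, word, kept, saw) => if word ≠ [] then out ++ [if saw then kept else word] else out

def sms_encoding_alt (data : String) : String :=
  PySem.Str.join " "
    ((pvFinishB (data.toList.foldl pvStepB ([], [], [], false))).map String.ofList)

-- ===== PRECONDITION & SPEC =====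
def Spec_sms_encoding (data : String) (out : String) : Prop := out = sms_encoding_alt data
instance (data : String) (out : String) : Decidable (Spec_sms_encoding data out) := by unfold Spec_sms_encoding; infer_instance

-- ===== CLAIM (what is proved, stated in full; the proofs are below) =====
def Claim_equal_sms_encoding : Prop := ∀ (data : String), Dom_sms_encoding data → Spec_sms_encoding data (sms_encoding data)

-- ===== LEMMAS AND PROOFS =====
-- split₀.go's accumulator is just prepended (reversed) to the accumulator-free run
theorem pvGo_acc (cs : List Char) : ∀ (cur : List Char) (acc : List (List Char)),
    PySem.Chars.split₀.go cs cur acc = acc.reverse ++ PySem.Chars.split₀.go cs cur [] := by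
  induction cs with
  | nil =>
    intro cur acc
    simp [PySem.Chars.split₀.go]
    split_ifs <;> simp
  | cons c rest ih =>
    intro cur acc
    simp only [PySem.Chars.split₀.go]
    split_ifs with h1 h2
    · exact ih [] acc
    · rw [ih [] (cur.reverse :: acc), ih [] [cur.reverse]]
      simp
    · exact ih (c :: cur) acc

-- main invariant: B's fold, started on the canonical state of a partially read word,
-- produces exactly the A-encoded words of split₀.go
theorem pvFold_spec (cs : List Char) : ∀ (out : List (List Char)) (word : List Char),
    pvFinishB (cs.foldl pvStepB
        (out, word, word.filter (fun c => !pvIsVowel c),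
          word.any (fun c => !pvIsVowel c && PySem.Chars.isalpha c)))
      = out ++ (PySem.Chars.split₀.go cs word.reverse []).map pvEncodeWordA := by
  induction cs with
  | nil =>
    intro out word
    simp only [List.foldl_nil, pvFinishB, PySem.Chars.split₀.go]
    by_cases hw : word = []
    · simp [hw]
    · simp [hw, List.isEmpty_iff, pvEncodeWordA, Bool.and_comm]
  | cons c rest ih =>
    intro out word
    simp only [List.foldl_cons, pvStepB, PySem.Chars.split₀.go]
    by_cases hs : PySem.Chars.isspace c = true
    · by_cases hw : word = []
      · simp only [hs, if_pos, hw, ne_eq, not_true_eq_false, if_false]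
        have := ih out ([] : List Char)
        simpa using this
      · simp only [hs, if_true, ne_eq, hw, not_false_eq_true, if_true,
          List.isEmpty_iff, List.reverse_eq_nil_iff, List.reverse_reverse]
        rw [if_neg (fun h => h : ¬False)]
        have h2 : (if word.any (fun c => !pvIsVowel c && PySem.Chars.isalpha c) = true
            then word.filter (fun c => !pvIsVowel c) else word) = pvEncodeWordA word := by
          simp [pvEncodeWordA, Bool.and_comm]
        rw [h2]
        have := ih (out ++ [pvEncodeWordA word]) ([] : List Char)
        simp only [List.filter_nil, List.any_nil, List.reverse_nil] at this
        rw [this, pvGo_acc rest [] [word]]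
        simp
    · by_cases hv : pvIsVowel c = true
      · simp only [hs, hv, if_true]
        have := ih out (word ++ [c])
        simp only [List.filter_append, List.any_append, List.filter_cons, List.filter_nil,
          List.any_cons, List.any_nil, hv, Bool.not_true, Bool.false_and, Bool.or_false,
          List.reverse_append, List.reverse_singleton, List.singleton_append,
          if_neg, Bool.false_eq_true, not_false_eq_true, List.append_nil] at this
        simpa [hs] using this
      · simp only [hs, hv]
        have := ih out (word ++ [c])
        simp only [List.filter_append, List.any_append, List.filter_cons, List.filter_nil,
          List.any_cons, List.any_nil, hv, Bool.not_false, Bool.true_and, Bool.or_false,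
          List.reverse_append, List.reverse_singleton, List.singleton_append,
          if_pos] at this
        simpa [hs, hv] using this

-- ===== VERDICT (by name: the statement is the Claim_ definition above) =====
theorem sms_encoding_spec : Claim_equal_sms_encoding := by
  intro data _
  unfold Spec_sms_encoding sms_encoding sms_encoding_alt
  have := pvFold_spec data.toList [] []
  simp only [List.filter_nil, List.any_nil, List.reverse_nil, List.nil_append] at this
  rw [this]
  simp [PySem.Str.split₀, PySem.Chars.split₀, List.map_map, Function.comp_def]
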